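-- pv_equiv track=rewrite | github.com/MrBrantCode/unitest_baseline | mut_generate/mist_train_taco/taco_266/solution.py | count_valid_subsequences
-- ===== SOURCE A (Python) =====
-- from collections import defaultdict
-- from itertools import accumulate
--
-- def count_valid_subsequences(N, K, A):
--     a = list(accumulate([0] + A))
--     a = [(a[i] - i) % K for i in range(N + 1)]
--     answer = 0
--     dic = defaultdict(int)
--     for i, x in enumerate(a):
--         answer += dic[x]
--         dic[x] += 1
--         if i >= K - 1:
--             dic[a[i - K + 1]] -= 1
--     return answer
-- ===== SOURCE B (Python) =====
-- def count_valid_subsequences(N, K, A):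
--     # residues r[i] = (prefix_sum(i) - i) % K, built in one pass
--     r = []
--     s = 0
--     for i in range(N + 1):
--         r.append((s - i) % K)
--         if i < N:
--             s += A[i]
--     # for each i, scan its window [max(0, i-K+1), i) directly for equal residues
--     answer = 0
--     for i in range(N + 1):
--         lo = i - K + 1
--         if lo < 0:
--             lo = 0
--         for j in range(lo, i):
--             if r[j] == r[i]:
--                 answer += 1
--     return answer
-- ===== Notes on version B (the rewrite author's own statement) =====
-- stated objective: alternative
-- what changed: A maintains a defaultdict as a sliding-window multiset of residues and adds its lookup at each step; B builds the residue array in one pass and, for each index, directly scans its window [max(0,i-K+1), i) counting equal residues, with no dict.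
import Mathlib
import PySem

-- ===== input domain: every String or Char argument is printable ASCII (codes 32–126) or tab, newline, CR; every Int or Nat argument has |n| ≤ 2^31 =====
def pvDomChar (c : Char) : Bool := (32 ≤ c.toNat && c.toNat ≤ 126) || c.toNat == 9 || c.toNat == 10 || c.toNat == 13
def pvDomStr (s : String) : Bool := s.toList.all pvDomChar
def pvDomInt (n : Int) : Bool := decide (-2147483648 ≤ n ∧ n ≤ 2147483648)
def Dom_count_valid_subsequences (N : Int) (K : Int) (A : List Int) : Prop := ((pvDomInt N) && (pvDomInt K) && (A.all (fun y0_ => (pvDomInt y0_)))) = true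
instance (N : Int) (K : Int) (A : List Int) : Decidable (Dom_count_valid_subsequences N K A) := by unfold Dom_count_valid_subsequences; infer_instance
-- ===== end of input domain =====

-- B replaces A's defaultdict sliding-window counter by a direct scan of each index's
-- length-(K-1) residue window (no dict); objective: alternative, not faster.

-- ===== PORT A =====
-- itertools.accumulate, structurally (running partial sums)
def pvAccumGo (s : Int) : List Int → List Int
  | [] => [s]
  | y :: ys => s :: pvAccumGo (s + y) ys

def pvAccumulate : List Int → List Int
  | [] => []
  | x :: xs => pvAccumGo x xs

-- the body of A's 'for i, x in enumerate(a)' loop; 'a' is the residue list it indexes into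
def pvStepA (K : Int) (a : List Int) (st : Int × PySem.Dict Int Int) (p : Int × Int) :
    Int × PySem.Dict Int Int :=
  let answer := st.1 + st.2.getD p.2 0
  let dic := st.2.insert p.2 (st.2.getD p.2 0 + 1)
  if p.1 ≥ K - 1 then
    let y := PySem.List.pyGetD a (p.1 - K + 1) 0
    (answer, dic.insert y (dic.getD y 0 - 1))
  else (answer, dic)

def count_valid_subsequences (N : Int) (K : Int) (A : List Int) : Int :=
  let a0 := pvAccumulate (0 :: A)
  let a := (PySem.List.pyRange 0 (N + 1) 1).map
    (fun i => PySem.Int.mod (PySem.List.pyGetD a0 i 0 - i) K)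
  ((PySem.List.enumerate a).foldl (pvStepA K a) (0, PySem.Dict.empty)).1

-- ===== PORT B =====
-- lo = i - K + 1 clamped to 0 (B's 'if lo < 0: lo = 0')
def pvLoB (K : Int) (i : Int) : Int := if i - K + 1 < 0 then 0 else i - K + 1

-- body of B's inner 'for j in range(lo, i)' loop
def pvInnerB (r : List Int) (i : Int) (answer : Int) (j : Int) : Int :=
  if PySem.List.pyGetD r j 0 = PySem.List.pyGetD r i 0 then answer + 1 else answer

-- body of B's residue-building loop: state (r, s)
def pvResStepB (N : Int) (K : Int) (A : List Int) (st : List Int × Int) (i : Int) :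
    List Int × Int :=
  (st.1 ++ [PySem.Int.mod (st.2 - i) K],
   if i < N then st.2 + PySem.List.pyGetD A i 0 else st.2)

def count_valid_subsequences_alt (N : Int) (K : Int) (A : List Int) : Int :=
  let r := ((PySem.List.pyRange 0 (N + 1) 1).foldl (pvResStepB N K A) ([], 0)).1
  (PySem.List.pyRange 0 (N + 1) 1).foldl
    (fun answer i => (PySem.List.pyRange (pvLoB K i) i 1).foldl (pvInnerB r i) answer) 0

-- ===== PRECONDITION & SPEC =====
-- Pre_ excludes exactly the inputs on which A raises: with N ≥ 0, K = 0 (ZeroDivisionError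
-- in the residue list) and K < 0 or N > len(A) (IndexError); for N < 0 A returns for any K.
def Pre_count_valid_subsequences (N : Int) (K : Int) (A : List Int) : Prop :=
  N < 0 ∨ (1 ≤ K ∧ N ≤ A.length)
instance (N : Int) (K : Int) (A : List Int) : Decidable (Pre_count_valid_subsequences N K A) := by
  unfold Pre_count_valid_subsequences; infer_instance

def pvWitness_count_valid_subsequences : Int × Int × List Int := (3, 2, [1, 4, 2])

def Spec_count_valid_subsequences (N : Int) (K : Int) (A : List Int) (out : Int) : Prop := out = count_valid_subsequences_alt N K A
instance (N : Int) (K : Int) (A : List Int) (out : Int) : Decidable (Spec_count_valid_subsequences N K A out) := by unfold Spec_count_valid_subsequences; infer_instance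

-- ===== CLAIM (what is proved, stated in full; the proofs are below) =====
def Claim_equal_count_valid_subsequences : Prop := ∀ (N : Int) (K : Int) (A : List Int), Dom_count_valid_subsequences N K A → Pre_count_valid_subsequences N K A → Spec_count_valid_subsequences N K A (count_valid_subsequences N K A)


-- ===== LEMMAS AND PROOFS =====

-- the residue value both programs compute at index i
def pvRes (K : Int) (A : List Int) (i : Int) : Int :=
  PySem.Int.mod ((A.take i.toNat).sum - i) K

-- number of earlier same-residue indices in the window [max 0 (s-K+1), s)
def pvCnt (K : Int) (R : List Int) (s x : Int) : Int :=
  ((PySem.List.pyRange (pvLoB K s) s 1).countP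
    (fun j => decide (PySem.List.pyGetD R j 0 = x)) : Int)

lemma accumGo_getD (l : List Int) (s : Int) (k : Nat) (hk : k ≤ l.length) :
    (pvAccumGo s l).getD k 0 = s + (l.take k).sum := by
  induction l generalizing s k with
  | nil =>
    have : k = 0 := by simpa using hk
    subst this; simp [pvAccumGo]
  | cons y ys ih =>
    cases k with
    | zero => simp [pvAccumGo]
    | succ k =>
      simp only [pvAccumGo, List.getD_cons_succ, List.take_succ_cons, List.sum_cons]
      rw [ih (s + y) k (by simpa using hk)]
      ring

lemma accumGo_length (l : List Int) (s : Int) : (pvAccumGo s l).length = l.length + 1 := by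
  induction l generalizing s with
  | nil => simp [pvAccumGo]
  | cons y ys ih => simp [pvAccumGo, ih]

-- A's residue list is the common residue map
lemma A_res (N K : Int) (A : List Int) (h : N ≤ A.length) :
    (PySem.List.pyRange 0 (N + 1) 1).map
      (fun i => PySem.Int.mod (PySem.List.pyGetD (pvAccumulate (0 :: A)) i 0 - i) K)
    = (PySem.List.pyRange 0 (N + 1) 1).map (pvRes K A) := by
  apply List.map_congr_left
  intro i hi
  rw [PySem.List.mem_pyRange_one] at hi
  have hlt : i < ((pvAccumGo 0 A).length : Int) := by rw [accumGo_length]; push_cast; omega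
  show PySem.Int.mod (PySem.List.pyGetD (pvAccumGo 0 A) i 0 - i) K = _
  rw [PySem.List.pyGetD_eq_getElem (pvAccumGo 0 A) 0 hi.1 hlt]
  have hval : (pvAccumGo 0 A)[i.toNat]'(by omega) = 0 + (A.take i.toNat).sum := by
    rw [← List.getD_eq_getElem _ 0]; exact accumGo_getD A 0 i.toNat (by omega)
  rw [hval, pvRes]
  ring_nf

-- B's residue list is the same map
lemma B_res (N K : Int) (A : List Int) (h : N ≤ A.length) :
    ∀ (n : Nat) (i : Int), (N + 1 - i).toNat = n → 0 ≤ i →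
    ∀ (acc : List Int) (s : Int), (i ≤ N → s = (A.take i.toNat).sum) →
    ((PySem.List.pyRange i (N + 1) 1).foldl (pvResStepB N K A) (acc, s)).1
      = acc ++ (PySem.List.pyRange i (N + 1) 1).map (pvRes K A) := by
  intro n
  induction n with
  | zero =>
    intro i hn hi acc s hs
    rw [PySem.List.pyRange_one_eq_nil (by omega)]
    simp
  | succ n ih =>
    intro i hn hi acc s hs
    have hiN : i < N + 1 := by omega
    rw [PySem.List.pyRange_one_cons hiN]
    simp only [List.foldl_cons, List.map_cons]
    have hsum : s = (A.take i.toNat).sum := hs (by omega)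
    have hstep : pvResStepB N K A (acc, s) i
        = (acc ++ [pvRes K A i], if i < N then s + PySem.List.pyGetD A i 0 else s) := by
      simp [pvResStepB, pvRes, hsum]
    rw [hstep]
    rw [ih (i + 1) (by omega) (by omega)]
    · simp
    · intro hle
      have hiN' : i < N := by omega
      have hilen : i < (A.length : Int) := by omega
      rw [if_pos hiN', PySem.List.pyGetD_eq_getElem A 0 hi hilen, hsum]
      have : (i + 1).toNat = i.toNat + 1 := by omega
      rw [this, List.sum_take_succ A i.toNat (by omega)]

-- how the window count changes when the window slides one step to the right
lemma cnt_succ (K : Int) (R : List Int) (hK : 1 ≤ K) (s : Int) (hs : 0 ≤ s) (x' : Int) :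
    pvCnt K R (s + 1) x' = pvCnt K R s x'
      + (if PySem.List.pyGetD R s 0 = x' then 1 else 0)
      - (if s ≥ K - 1 ∧ PySem.List.pyGetD R (s - K + 1) 0 = x' then 1 else 0) := by
  by_cases hc : s ≥ K - 1
  · have hlo : pvLoB K s = s - K + 1 := by unfold pvLoB; rw [if_neg (by omega)]
    have hlo' : pvLoB K (s + 1) = s - K + 2 := by
      unfold pvLoB; rw [if_neg (by omega)]; ring
    have hsplit : PySem.List.pyRange (s - K + 1) (s + 1) 1
        = (s - K + 1) :: PySem.List.pyRange (s - K + 2) (s + 1) 1 := by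
      rw [PySem.List.pyRange_one_cons (by omega)]; ring_nf
    have hsplit2 : PySem.List.pyRange (s - K + 1) (s + 1) 1
        = PySem.List.pyRange (s - K + 1) s 1 ++ [s] :=
      PySem.List.pyRange_one_succ_right (by omega)
    have e1 := congrArg (List.countP (fun j => decide (PySem.List.pyGetD R j 0 = x'))) (hsplit2.symm.trans hsplit)
    simp only [List.countP_append, List.countP_cons, List.countP_nil,
      decide_eq_true_eq] at e1
    unfold pvCnt
    rw [hlo, hlo', if_congr (and_iff_right hc) rfl rfl]
    by_cases h1 : PySem.List.pyGetD R s 0 = x' <;>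
      by_cases h2 : PySem.List.pyGetD R (s - K + 1) 0 = x' <;>
        simp only [h1, h2, ite_true, ite_false] at e1 ⊢ <;> omega
  · have hK1 : pvLoB K (s + 1) = pvLoB K s := by
      unfold pvLoB; split_ifs <;> omega
    unfold pvCnt
    rw [hK1, if_neg (show ¬(s ≥ K - 1 ∧ PySem.List.pyGetD R (s - K + 1) 0 = x') from fun h => hc h.1)]
    have hsp : PySem.List.pyRange (pvLoB K s) (s + 1) 1
        = PySem.List.pyRange (pvLoB K s) s 1 ++ [s] := by
      apply PySem.List.pyRange_one_succ_right
      unfold pvLoB; split_ifs <;> omega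
    rw [hsp, List.countP_append]
    simp only [List.countP_singleton, decide_eq_true_eq]
    by_cases h1 : PySem.List.pyGetD R s 0 = x' <;>
      simp only [h1, ite_true, ite_false] <;> push_cast <;> omega

-- A's loop invariant: the dict holds the window counts, the accumulator the partial answer
lemma A_loop (K : Int) (R : List Int) (hK : 1 ≤ K) :
    ∀ (t : List Int) (s : Int), 0 ≤ s → t = R.drop s.toNat →
    ∀ (ans : Int) (d : PySem.Dict Int Int), (∀ x, d.getD x 0 = pvCnt K R s x) →
    ((PySem.List.enumerate t s).foldl (pvStepA K R) (ans, d)).1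
      = ans + ((PySem.List.pyRange s (s + t.length) 1).map
          (fun i => pvCnt K R i (PySem.List.pyGetD R i 0))).sum := by
  intro t
  induction t with
  | nil =>
    intro s hs ht ans d hd
    simp only [List.length_nil, Nat.cast_zero, add_zero]
    rw [PySem.List.pyRange_one_eq_nil le_rfl]
    simp [PySem.List.enumerate_nil]
  | cons x t' ih =>
    intro s hs ht ans d hd
    have hlt : s.toNat < R.length := by
      by_contra hge
      rw [List.drop_eq_nil_of_le (by omega)] at ht
      exact List.cons_ne_nil x t' ht
    rw [← List.getElem_cons_drop hlt] at ht
    have hx : x = R[s.toNat] := (List.cons_eq_cons.mp ht).1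
    have ht' : t' = R.drop (s + 1).toNat := by
      rw [(List.cons_eq_cons.mp ht).2]
      congr 1
      omega
    have hxget : x = PySem.List.pyGetD R s 0 := by
      rw [PySem.List.pyGetD_eq_getElem R 0 hs (by omega)]; exact hx
    rw [PySem.List.enumerate_cons, List.foldl_cons]
    have hstep1 : (pvStepA K R (ans, d) (s, x)).1 = ans + pvCnt K R s x := by
      unfold pvStepA
      split_ifs <;> simp [hd]
    have hstep2 : ∀ x', (pvStepA K R (ans, d) (s, x)).2.getD x' 0 = pvCnt K R (s + 1) x' := by
      intro x'
      rw [cnt_succ K R hK s hs x']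
      unfold pvStepA
      clear ih hstep1 ht hx ht'
      by_cases hc : s ≥ K - 1
      · rw [if_pos hc]
        simp only [PySem.Dict.getD_insert]
        rw [← hxget, if_congr (and_iff_right hc) rfl rfl]
        simp only [hd]
        rcases eq_or_ne x' (PySem.List.pyGetD R (s - K + 1) 0) with h2 | h2 <;>
          rcases eq_or_ne x' x with h1 | h1 <;>
            simp [h1, h2, eq_comm] <;> omega
      · rw [if_neg hc]
        simp only [PySem.Dict.getD_insert]
        rw [← hxget,
          if_neg (show ¬(s ≥ K - 1 ∧ PySem.List.pyGetD R (s - K + 1) 0 = x') from fun h => hc h.1)]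
        simp only [hd]
        rcases eq_or_ne x' x with h1 | h1 <;> simp [h1, eq_comm] <;> omega
    have key := ih (s + 1) (by omega) ht'
      (pvStepA K R (ans, d) (s, x)).1 (pvStepA K R (ans, d) (s, x)).2 hstep2
    rw [Prod.mk.eta] at key
    rw [key, hstep1]
    have hlen : s + (((x :: t').length : Nat) : Int) = (s + 1) + ((t'.length : Nat) : Int) := by
      simp only [List.length_cons]; push_cast; ring
    rw [hlen, PySem.List.pyRange_one_cons (a := s) (b := s + 1 + (t'.length : Int)) (by omega)]
    simp only [List.map_cons, List.sum_cons]
    rw [← hxget]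
    ring

-- B's outer loop sums exactly the window counts
lemma B_loop (K : Int) (R : List Int) (l : List Int) (ans : Int) :
    l.foldl (fun answer i =>
        (PySem.List.pyRange (pvLoB K i) i 1).foldl (pvInnerB R i) answer) ans
      = ans + (l.map (fun i => pvCnt K R i (PySem.List.pyGetD R i 0))).sum := by
  rw [PySem.List.foldl_congr_mem l _
    (fun answer i => answer + pvCnt K R i (PySem.List.pyGetD R i 0)) ans ?_]
  · exact PySem.List.foldl_add l _ ans
  · intro acc i _
    show (PySem.List.pyRange (pvLoB K i) i 1).foldl (pvInnerB R i) acc = _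
    unfold pvInnerB pvCnt
    exact PySem.List.foldl_ite_add_one
      (fun j => PySem.List.pyGetD R j 0 = PySem.List.pyGetD R i 0) _ acc

-- ===== VERDICT (by name: the statement is the Claim_ definition above) =====
theorem count_valid_subsequences_spec : Claim_equal_count_valid_subsequences := by
  intro N K A _ hPre
  unfold Spec_count_valid_subsequences
  by_cases hN : N < 0
  · have hnil : PySem.List.pyRange 0 (N + 1) 1 = [] :=
      PySem.List.pyRange_one_eq_nil (by omega)
    simp [count_valid_subsequences, count_valid_subsequences_alt, hnil,
      PySem.List.enumerate_nil]
  · obtain ⟨hK, hNA⟩ : 1 ≤ K ∧ N ≤ A.length := hPre.resolve_left hN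
    simp only [count_valid_subsequences, count_valid_subsequences_alt]
    rw [A_res N K A hNA]
    have hBres := B_res N K A hNA (N + 1 - 0).toNat 0 rfl le_rfl [] 0 (by intro _; simp)
    rw [hBres, List.nil_append]
    set R := (PySem.List.pyRange 0 (N + 1) 1).map (pvRes K A) with hR
    have hlen : ((R.length : Nat) : Int) = N + 1 := by
      rw [hR, List.length_map, PySem.List.length_pyRange_one]
      omega
    rw [B_loop K R _ 0]
    rw [A_loop K R hK R 0 le_rfl (by simp) 0 PySem.Dict.empty ?_]
    · rw [hlen]; simp
    · intro x
      rw [PySem.Dict.getD_empty]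
      unfold pvCnt
      rw [PySem.List.pyRange_one_eq_nil (by unfold pvLoB; split_ifs <;> omega)]
      simp
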